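-- pv_equiv track=rewrite | github.com/ThiagoValle98/Processo-Seletivo | ex1CI&T.py | ultima_parada
-- ===== SOURCE A (Python) =====
-- def ultima_parada(combustivel,consumo,postos_de_gasolina):
--     postos_de_gasolina= sorted(postos_de_gasolina)
--     autonomia = combustivel*consumo
--     for i in range (len(postos_de_gasolina)):
--         if postos_de_gasolina[i] > autonomia and postos_de_gasolina[i] == postos_de_gasolina[0]:
--             return -1
--
--         elif postos_de_gasolina[i] < autonomia and postos_de_gasolina[i] == postos_de_gasolina[-1]:
--             return postos_de_gasolina[-1]
--
--         elif postos_de_gasolina[i] > autonomia: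
--             return postos_de_gasolina[i-1]
-- ===== SOURCE B (Python) =====
-- def ultima_parada(combustivel, consumo, postos_de_gasolina):
--     # Last station the car can still reach: the farthest station within the
--     # car's autonomy; -1 when no station is reachable.
--     autonomia = combustivel * consumo
--     alcancaveis = [p for p in postos_de_gasolina if p <= autonomia]
--     return max(alcancaveis) if alcancaveis else -1
-- ===== Notes on version B (the rewrite author's own statement) =====
-- stated objective: simpler
-- what changed: B replaces A's sort followed by an index scan with a cascading tie-break on s[0]/s[-1] by a single filter of the reachable stations and one max (no sorting); Pre_ excludes the inputs (empty list, or maximum station exactly equal to the autonomy with none beyond it) on which A falls off its loop and returns None instead of an int.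
-- outside the precondition, e.g. on ultima_parada(1, 1, []): A returns None, B returns -1; on ultima_parada(2, 3, [3, 6]): A returns None, B returns 6
import Mathlib
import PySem

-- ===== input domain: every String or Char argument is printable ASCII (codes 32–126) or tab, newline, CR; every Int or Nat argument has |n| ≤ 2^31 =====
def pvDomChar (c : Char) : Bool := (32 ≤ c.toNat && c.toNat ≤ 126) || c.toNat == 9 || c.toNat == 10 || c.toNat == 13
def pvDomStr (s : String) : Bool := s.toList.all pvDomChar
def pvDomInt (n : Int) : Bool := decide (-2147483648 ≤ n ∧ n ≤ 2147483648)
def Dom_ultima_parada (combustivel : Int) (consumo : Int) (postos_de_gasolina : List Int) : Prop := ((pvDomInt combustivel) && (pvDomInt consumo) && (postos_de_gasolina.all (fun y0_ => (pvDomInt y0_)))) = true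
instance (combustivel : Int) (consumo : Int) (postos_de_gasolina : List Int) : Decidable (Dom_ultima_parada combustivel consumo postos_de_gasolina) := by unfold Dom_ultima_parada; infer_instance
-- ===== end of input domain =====

-- B replaces A's sort + index scan by a filter of the reachable stations and one max (-1 if none);
-- Pre_ excludes the inputs (empty list, or max station exactly equal to the autonomy with none beyond) on which A returns None, not an int.


-- ===== PORT A =====
-- the for loop over range(len(s)), as structural recursion over the sorted list;
-- s0 = s[0], sl = s[-1], prev = s[i-1] (at i = 0 Python's s[i-1] is s[-1] = sl)
def pvLoopA (a s0 sl : Int) (prev : Int) : List Int → Int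
  | [] => 0                                   -- loop falls through: Python returns None (outside Pre_)
  | x :: rest =>
    if a < x ∧ x = s0 then -1
    else if x < a ∧ x = sl then sl
    else if a < x then prev
    else pvLoopA a s0 sl x rest

def ultima_parada (combustivel : Int) (consumo : Int) (postos_de_gasolina : List Int) : Int :=
  let s := PySem.List.sorted postos_de_gasolina (fun x => x) false
  let autonomia := combustivel * consumo
  match s with
  | [] => 0                                   -- empty: loop body never runs, Python returns None (outside Pre_)
  | s0 :: t =>
    let sl := (s0 :: t).getLast (by simp)
    pvLoopA autonomia s0 sl sl (s0 :: t)

-- ===== PORT B =====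
-- filter of the reachable stations, then max (Python's 'max(r) if r else -1')
def ultima_parada_alt (combustivel : Int) (consumo : Int) (postos_de_gasolina : List Int) : Int :=
  let autonomia := combustivel * consumo
  let alcancaveis := postos_de_gasolina.filter (fun p => decide (p ≤ autonomia))
  match PySem.List.max? alcancaveis (fun x => x) with
  | some m => m
  | none => -1

-- ===== PRECONDITION & SPEC =====
-- Pre_ excludes exactly the inputs on which A returns None instead of an int: the empty list,
-- and lists whose maximum equals autonomia exactly with no station beyond it.
def Pre_ultima_parada (combustivel : Int) (consumo : Int) (postos_de_gasolina : List Int) : Prop :=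
  (∃ x ∈ postos_de_gasolina, combustivel * consumo < x) ∨
  (postos_de_gasolina ≠ [] ∧ ∀ x ∈ postos_de_gasolina, x < combustivel * consumo)
instance (combustivel : Int) (consumo : Int) (postos_de_gasolina : List Int) : Decidable (Pre_ultima_parada combustivel consumo postos_de_gasolina) := by unfold Pre_ultima_parada; infer_instance
def pvWitness_ultima_parada : Int × Int × List Int := (2, 3, [1, 10])

def Spec_ultima_parada (combustivel : Int) (consumo : Int) (postos_de_gasolina : List Int) (out : Int) : Prop := out = ultima_parada_alt combustivel consumo postos_de_gasolina
instance (combustivel : Int) (consumo : Int) (postos_de_gasolina : List Int) (out : Int) : Decidable (Spec_ultima_parada combustivel consumo postos_de_gasolina out) := by unfold Spec_ultima_parada; infer_instance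

-- ===== CLAIM (what is proved, stated in full; the proofs are below) =====
def Claim_equal_ultima_parada : Prop := ∀ (combustivel : Int) (consumo : Int) (postos_de_gasolina : List Int), Dom_ultima_parada combustivel consumo postos_de_gasolina → Pre_ultima_parada combustivel consumo postos_de_gasolina → Spec_ultima_parada combustivel consumo postos_de_gasolina (ultima_parada combustivel consumo postos_de_gasolina)

-- ===== LEMMAS AND PROOFS =====

-- running "max of the elements ≤ a" (none while no such element has been seen):
-- a one-step fold that characterises B's filter-then-max
def pvOptMax (a : Int) (b : Option Int) (p : Int) : Option Int :=
  if a < p then b else match b with | none => some p | some b' => some (max b' p)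

theorem pvOptMax_filter_some (a : Int) (xs : List Int) : ∀ p : Int,
    xs.foldl (pvOptMax a) (some p) =
      some ((xs.filter (fun x => decide (x ≤ a))).foldl max p) := by
  induction xs with
  | nil => intro p; rfl
  | cons x rest ih =>
    intro p
    by_cases hx : a < x
    · simp [pvOptMax, hx, not_le.mpr hx, ih]
    · simp [pvOptMax, hx, not_lt.mp hx, ih]

theorem pvOptMax_filter_none (a : Int) (xs : List Int) :
    xs.foldl (pvOptMax a) none =
      match xs.filter (fun x => decide (x ≤ a)) with
      | [] => none
      | y :: t => some (t.foldl max y) := by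
  induction xs with
  | nil => rfl
  | cons x rest ih =>
    by_cases hx : a < x
    · simpa [pvOptMax, hx, List.filter_cons, not_le.mpr hx] using ih
    · simp [pvOptMax, hx, not_lt.mp hx, pvOptMax_filter_some]

-- B's result equals the pvOptMax fold (or -1 when it is none)
theorem ultima_parada_alt_eq (c k : Int) (xs : List Int) :
    ultima_parada_alt c k xs =
      match xs.foldl (pvOptMax (c * k)) none with
      | some m => m
      | none => -1 := by
  rw [ultima_parada_alt, pvOptMax_filter_none]
  cases hf : xs.filter (fun x => decide (x ≤ c * k)) with
  | nil => simp [PySem.List.max?]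
  | cons y t => simp [PySem.List.max?_id_cons]

theorem pvOptMax_rightComm (a : Int) (b : Option Int) (p q : Int) :
    pvOptMax a (pvOptMax a b p) q = pvOptMax a (pvOptMax a b q) p := by
  cases b <;> simp [pvOptMax] <;> split_ifs <;> simp [max_comm, max_left_comm]

theorem foldl_pvOptMax_perm (a : Int) {xs ys : List Int} (h : xs.Perm ys) (b : Option Int) :
    xs.foldl (pvOptMax a) b = ys.foldl (pvOptMax a) b := by
  haveI : RightCommutative (pvOptMax a) := ⟨fun b p q => pvOptMax_rightComm a b p q⟩
  exact h.foldl_eq b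

-- all elements beyond reach: best stays none
theorem foldl_pvOptMax_none (a : Int) (xs : List Int) (h : ∀ x ∈ xs, a < x) :
    xs.foldl (pvOptMax a) none = none := by
  induction xs with
  | nil => rfl
  | cons x rest ih =>
    simp only [List.foldl_cons, pvOptMax, if_pos (h x (by simp))]
    exact ih (fun y hy => h y (by simp [hy]))

-- the last element ≤ a of (prev :: u), as a fold
def pvLastLe (a : Int) (prev : Int) (u : List Int) : Int :=
  u.foldl (fun p x => if a < x then p else x) prev

theorem pvLastLe_of_all_gt (a : Int) (u : List Int) (h : ∀ x ∈ u, a < x) (prev : Int) :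
    pvLastLe a prev u = prev := by
  induction u generalizing prev with
  | nil => rfl
  | cons x rest ih =>
    simp only [pvLastLe, List.foldl_cons, if_pos (h x (by simp))]
    exact ih (fun y hy => h y (by simp [hy])) prev

theorem pvLastLe_of_all_le (a : Int) (u : List Int) (h : ∀ x ∈ u, ¬ a < x) (prev : Int) :
    pvLastLe a prev u = u.getLastD prev := by
  induction u generalizing prev with
  | nil => rfl
  | cons x rest ih =>
    simp only [pvLastLe, List.foldl_cons, if_neg (h x (by simp)), List.getLastD_cons]
    exact ih (fun y hy => h y (by simp [hy])) x

-- on a sorted list, the running max of elements ≤ a is exactly the last element ≤ a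
theorem foldl_pvOptMax_sorted (a : Int) (u : List Int) (hs : u.Pairwise (· ≤ ·)) :
    ∀ p : Int, (∀ y ∈ u, p ≤ y) → u.foldl (pvOptMax a) (some p) = some (pvLastLe a p u) := by
  induction u with
  | nil => intro p _; rfl
  | cons x rest ih =>
    intro p hp
    have hrest := hs.of_cons
    have hpx : p ≤ x := hp x (by simp)
    by_cases hx : a < x
    · simp only [List.foldl_cons, pvOptMax, pvLastLe, if_pos hx]
      exact ih hrest p (fun y hy => le_trans hpx ((List.pairwise_cons.mp hs).1 y hy))
    · simp only [List.foldl_cons, pvOptMax, pvLastLe, if_neg hx, max_eq_right hpx]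
      exact ih hrest x (List.pairwise_cons.mp hs).1

-- A's loop when every station is within reach: it returns s[-1]
theorem pvLoopA_all_lt (a s0 sl : Int) (u : List Int) (hlt : ∀ x ∈ u, x < a) (hsl : sl ∈ u) :
    ∀ prev, pvLoopA a s0 sl prev u = sl := by
  induction u with
  | nil => cases hsl
  | cons x rest ih =>
    intro prev
    have hx : x < a := hlt x (by simp)
    have h1 : ¬ (a < x ∧ x = s0) := by rintro ⟨h, -⟩; exact absurd hx (not_lt.mpr (le_of_lt h))
    by_cases hxs : x = sl
    · simp only [pvLoopA]
      rw [if_neg h1, if_pos ⟨hx, hxs⟩]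
    · have hsl' : sl ∈ rest := by
        rcases List.mem_cons.mp hsl with h | h
        · exact absurd h.symm hxs
        · exact h
      simp only [pvLoopA]
      rw [if_neg h1, if_neg (by rintro ⟨-, h2⟩; exact hxs h2),
        if_neg (not_lt.mpr (le_of_lt hx))]
      exact ih (fun y hy => hlt y (by simp [hy])) hsl' x

-- A's loop when some station is beyond reach (and s[0] ≤ a ≤ stations ≤ s[-1]):
-- it returns the last element ≤ a of (prev :: u)
theorem pvLoopA_mixed (a s0 sl : Int) (hs0 : s0 ≤ a) (u : List Int)
    (hmax : ∀ y ∈ u, y ≤ sl) (hs : u.Pairwise (· ≤ ·)) (hgt : ∃ x ∈ u, a < x) :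
    ∀ prev, pvLoopA a s0 sl prev u = pvLastLe a prev u := by
  induction u with
  | nil => rcases hgt with ⟨x, hx, -⟩; cases hx
  | cons x rest ih =>
    intro prev
    obtain ⟨g, hg, hag⟩ := hgt
    by_cases hx : a < x
    · have hrest : ∀ y ∈ rest, a < y :=
        fun y hy => lt_of_lt_of_le hx ((List.pairwise_cons.mp hs).1 y hy)
      simp only [pvLoopA, pvLastLe, List.foldl_cons]
      rw [if_neg (by rintro ⟨-, h2⟩; exact absurd hs0 (not_le.mpr (h2 ▸ hx))),
        if_neg (by rintro ⟨h1, -⟩; exact absurd hx (not_lt.mpr (le_of_lt h1))), if_pos hx,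
        if_pos hx]
      exact (pvLastLe_of_all_gt a rest hrest prev).symm
    · -- x ≤ a; the beyond-reach station is in rest
      have hg' : g ∈ rest := by
        rcases List.mem_cons.mp hg with h | h
        · exact absurd (h ▸ hag) hx
        · exact h
      have hxsl : ¬ (x < a ∧ x = sl) := by
        rintro ⟨-, h2⟩
        exact hx (lt_of_lt_of_le hag (le_of_le_of_eq (hmax g hg) h2.symm))
      simp only [pvLoopA, pvLastLe, List.foldl_cons,
        if_neg (show ¬ (a < x ∧ x = s0) from fun h => hx h.1), if_neg hxsl, if_neg hx]
      exact ih (fun y hy => hmax y (by simp [hy])) hs.of_cons ⟨g, hg', hag⟩ x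

-- on a ≤-sorted list every element is at most the last one
theorem pvPairwise_le_getLast (l : List Int) (h : l.Pairwise (· ≤ ·)) (hne : l ≠ []) :
    ∀ x ∈ l, x ≤ l.getLast hne := by
  induction l with
  | nil => exact absurd rfl hne
  | cons y rest ih =>
    intro x hx
    cases rest with
    | nil =>
      rcases List.mem_cons.mp hx with h0 | h0
      · simp [h0]
      · cases h0
    | cons z rs =>
      rw [List.getLast_cons (by simp)]
      rcases List.mem_cons.mp hx with h0 | h0
      · exact h0 ▸ (List.pairwise_cons.mp h).1 _ (List.getLast_mem _)
      · exact ih h.of_cons (by simp) x h0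

-- ===== VERDICT (by name: the statement is the Claim_ definition above) =====
theorem ultima_parada_spec : Claim_equal_ultima_parada := by
  intro c k postos _ hpre
  cases hpostos : postos with
  | nil =>
    rw [hpostos] at hpre
    rcases hpre with ⟨x, hx, -⟩ | ⟨hne, -⟩
    · cases hx
    · exact absurd rfl hne
  | cons p0 ps =>
    subst hpostos
    unfold Spec_ultima_parada
    rw [ultima_parada_alt_eq]
    have hperm : (PySem.List.sorted (p0 :: ps) (fun y : Int => y) false).Perm (p0 :: ps) :=
      PySem.List.sorted_perm (p0 :: ps) (fun y : Int => y) false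
    have hpair : (PySem.List.sorted (p0 :: ps) (fun y : Int => y) false).Pairwise (· ≤ ·) := by
      have := PySem.List.sorted_pairwise (xs := p0 :: ps) (key := fun y : Int => y)
      simpa using this
    cases hsrt : PySem.List.sorted (p0 :: ps) (fun y : Int => y) false with
    | nil =>
      rw [hsrt] at hperm
      exact absurd hperm.length_eq (by simp)
    | cons s0 t =>
      rw [hsrt] at hperm hpair
      set a := c * k with ha
      have hmem_iff : ∀ x : Int, x ∈ p0 :: ps ↔ x ∈ s0 :: t := fun x => (hperm.mem_iff).symm
      have hfoldperm := foldl_pvOptMax_perm a hperm.symm (none : Option Int)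
      have hs0min : ∀ y ∈ s0 :: t, s0 ≤ y := by
        intro y hy
        rcases List.mem_cons.mp hy with h | h
        · exact le_of_eq h.symm
        · exact (List.pairwise_cons.mp hpair).1 y h
      have hslmem : (s0 :: t).getLast (by simp) ∈ s0 :: t := List.getLast_mem _
      have hslmax : ∀ y ∈ s0 :: t, y ≤ (s0 :: t).getLast (by simp) :=
        pvPairwise_le_getLast _ hpair (by simp)
      have hAeq : ultima_parada c k (p0 :: ps) =
          pvLoopA a s0 ((s0 :: t).getLast (by simp)) ((s0 :: t).getLast (by simp)) (s0 :: t) := by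
        simp only [ultima_parada, hsrt, ← ha]
      by_cases hs0 : a < s0
      · -- every station beyond reach: A hits branch 1 at i = 0 (-1), B's filter is empty
        have hallgt : ∀ x ∈ s0 :: t, a < x := fun x hx => lt_of_lt_of_le hs0 (hs0min x hx)
        have hbest : (p0 :: ps).foldl (pvOptMax a) none = none := by
          rw [hfoldperm]
          exact foldl_pvOptMax_none a _ hallgt
        have hA1 : ultima_parada c k (p0 :: ps) = -1 := by
          rw [hAeq]
          simp [pvLoopA, hs0]
        rw [hA1, hbest]
      · rw [not_lt] at hs0
        rcases hpre with ⟨g, hg, hag⟩ | ⟨-, hall⟩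
        · -- some station beyond reach: both return the largest station within reach
          have hag : a < g := hag
          have hgs : g ∈ s0 :: t := (hmem_iff g).mp hg
          have hA1 : ultima_parada c k (p0 :: ps) = pvLastLe a s0 t := by
            rw [hAeq, pvLoopA_mixed a s0 ((s0 :: t).getLast (by simp)) hs0 (s0 :: t)
              hslmax hpair ⟨g, hgs, hag⟩]
            simp [pvLastLe, if_neg (not_lt.mpr hs0)]
          have hbest : (p0 :: ps).foldl (pvOptMax a) none = some (pvLastLe a s0 t) := by
            rw [hfoldperm]
            simp only [List.foldl_cons, pvOptMax]
            rw [if_neg (not_lt.mpr hs0)]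
            exact foldl_pvOptMax_sorted a t hpair.of_cons s0 (List.pairwise_cons.mp hpair).1
          rw [hA1, hbest]
        · -- every station strictly within reach: both return the farthest station s[-1]
          have halllt : ∀ x ∈ s0 :: t, x < a := fun x hx => hall x ((hmem_iff x).mpr hx)
          have hA1 : ultima_parada c k (p0 :: ps) = (s0 :: t).getLast (by simp) := by
            rw [hAeq]
            exact pvLoopA_all_lt a s0 _ (s0 :: t) halllt hslmem _
          have hbest : (p0 :: ps).foldl (pvOptMax a) none = some ((s0 :: t).getLast (by simp)) := by
            rw [hfoldperm]
            simp only [List.foldl_cons, pvOptMax]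
            rw [if_neg (not_lt.mpr hs0),
              foldl_pvOptMax_sorted a t hpair.of_cons s0 (List.pairwise_cons.mp hpair).1,
              pvLastLe_of_all_le a t (fun y hy => not_lt.mpr (le_of_lt (halllt y (by simp [hy])))) s0]
            cases t with
            | nil => rfl
            | cons z rs =>
              rw [List.getLast_cons (by simp)]
              simp [List.getLastD_eq_getLast?, List.getLast?_eq_some_getLast (l := z :: rs) (by simp)]
          rw [hA1, hbest]
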